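-- pv_equiv track=rewrite | github.com/fogleman/pg | pg/pack.py | try_pack
-- ===== SOURCE A (Python) =====
-- class Node(object):
--     def __init__(self, x, y, w, h):
--         self.x = x
--         self.y = y
--         self.w = w
--         self.h = h
--         self.right = None
--         self.down = None
--     def insert(self, w, h):
--         if self.right:
--             result = self.right.insert(w, h)
--             if result:
--                 return result
--             result = self.down.insert(w, h)
--             if result:
--                 return result
--             return None
--         elif w <= self.w and h <= self.h:
--             self.right = Node(self.x + w, self.y, self.w - w, h)
--             self.down = Node(self.x, self.y + h, self.w, self.h - h)
--             return (self.x, self.y, w, h)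
--         else:
--             return None
--
-- def try_pack(tw, th, items):
--     result = []
--     node = Node(0, 0, tw, th)
--     for index, (w, h) in items:
--         position = node.insert(w, h)
--         if position is None:
--             return None
--         result.append((index, position))
--     result.sort()
--     result = [x[1] for x in result]
--     return result
-- ===== SOURCE B (Python) =====
-- def try_pack(tw, th, items):
--     # Region-recursive guillotine packer: instead of re-descending a mutable
--     # tree from the root for every item, each free region consumes the whole
--     # stream of items once -- it places the first item that fits, feeds the
--     # remaining items through its right strip, the right strip's rejects
--     # through its down strip, and returns its own rejects upward.
--     def region(x, y, w, h, its):
--         # returns (placed, rejected); rejected keeps original order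
--         for i, (idx, (iw, ih)) in enumerate(its):
--             if iw <= w and ih <= h:
--                 placed_r, rej_r = region(x + iw, y, w - iw, ih, its[i + 1:])
--                 placed_d, rej_d = region(x, y + ih, w, h - ih, rej_r)
--                 return ([(idx, (x, y, iw, ih))] + placed_r + placed_d,
--                         its[:i] + rej_d)
--         return [], list(its)
--     placed, rejected = region(0, 0, tw, th, list(items))
--     if rejected:
--         return None
--     placed.sort()
--     return [p for _, p in placed]
-- ===== Notes on version B (the rewrite author's own statement) =====
-- stated objective: alternative
-- what changed: Replaces A's per-item re-descent of a mutable guillotine tree (Node.insert recursion from the root for every item) with a region-recursive divide-and-conquer in which each free region consumes the whole item stream once: it places the first fitting item, feeds the remaining items through its right strip, the right strip's rejects through its down strip, and returns its own rejects upward; no tree or mutable state exists, equality of the final result is proved via a permutation argument on the placements plus the full-tuple sort.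
import Mathlib
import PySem

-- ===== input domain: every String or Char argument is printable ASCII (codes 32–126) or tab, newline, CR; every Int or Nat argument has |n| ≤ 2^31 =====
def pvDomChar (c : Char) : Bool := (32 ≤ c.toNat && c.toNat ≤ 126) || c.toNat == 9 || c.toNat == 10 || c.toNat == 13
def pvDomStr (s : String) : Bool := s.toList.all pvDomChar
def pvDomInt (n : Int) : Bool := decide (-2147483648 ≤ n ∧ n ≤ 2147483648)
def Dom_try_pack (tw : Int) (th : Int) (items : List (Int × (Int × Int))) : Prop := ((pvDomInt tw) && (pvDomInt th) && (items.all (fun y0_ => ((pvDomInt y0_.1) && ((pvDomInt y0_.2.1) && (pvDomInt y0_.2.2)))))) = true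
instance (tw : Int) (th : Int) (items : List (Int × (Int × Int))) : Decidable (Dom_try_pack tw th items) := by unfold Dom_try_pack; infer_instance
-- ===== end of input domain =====

-- B replaces A's per-item re-descent of a mutable guillotine tree with a region-recursive
-- divide-and-conquer in which each free region consumes the item stream once (alternative).

-- shared: Python's result.sort() compares the (index, (x, y, w, h)) tuples lexicographically
def pyPairKey (p : Int × (Int × Int × Int × Int)) :
    Lex (Int × Lex (Int × Lex (Int × Lex (Int × Int)))) :=
  toLex (p.1, toLex (p.2.1, toLex (p.2.2.1, toLex (p.2.2.2.1, p.2.2.2.2))))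

-- ===== PORT A =====
inductive PackNode where
  | leaf (x y w h : Int)
  | node (x y w h : Int) (right : PackNode) (down : PackNode)

-- Node.insert: returns (result, updated node); some = Python's tuple, none = Python's None
def nodeInsert : PackNode → Int → Int → Option (Int × Int × Int × Int) × PackNode
  | .node x y sw sh r d, w, h =>
    match nodeInsert r w h with
    | (some p, r') => (some p, .node x y sw sh r' d)
    | (none, _) =>
      match nodeInsert d w h with
      | (some p, d') => (some p, .node x y sw sh r d')
      | (none, _) => (none, .node x y sw sh r d)
  | .leaf x y sw sh, w, h =>
    if w ≤ sw ∧ h ≤ sh then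
      (some (x, y, w, h),
        .node x y sw sh (.leaf (x + w) y (sw - w) h) (.leaf x (y + h) sw (sh - h)))
    else (none, .leaf x y sw sh)

-- the 'for index, (w, h) in items' loop of A (early return None on a failed insert)
def packLoopA (t : PackNode) (items : List (Int × (Int × Int)))
    (acc : List (Int × (Int × Int × Int × Int))) :
    Option (List (Int × (Int × Int × Int × Int))) :=
  match items with
  | [] => some acc
  | (idx, (w, h)) :: rest =>
    match nodeInsert t w h with
    | (some p, t') => packLoopA t' rest (acc ++ [(idx, p)])
    | (none, _) => none

def try_pack (tw : Int) (th : Int) (items : List (Int × (Int × Int))) :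
    Option (List (Int × Int × Int × Int)) :=
  match packLoopA (.leaf 0 0 tw th) items [] with
  | none => none
  | some res => some ((PySem.List.sorted res pyPairKey).map (·.2))

-- ===== PORT B =====
-- B's inner 'for i, (idx, (iw, ih)) in enumerate(its)' scan: the prefix of items that
-- do not fit this region, the first fitting item, and the remaining suffix
def splitFirstFit (w h : Int) : List (Int × (Int × Int)) →
    Option (List (Int × (Int × Int)) × (Int × (Int × Int)) × List (Int × (Int × Int)))
  | [] => none
  | it :: rest =>
    if it.2.1 ≤ w ∧ it.2.2 ≤ h then some ([], it, rest)
    else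
      match splitFirstFit w h rest with
      | some (pre, hit, suf) => some (it :: pre, hit, suf)
      | none => none

-- B's region: places the first fitting item, feeds the rest through the right strip,
-- the right strip's rejects through the down strip; returns (placed, rejects).
-- fuel is a pure totality guard: items.length is always enough (fuel strictly
-- bounds the items a call can see, and each call consumes one item).
def region (fuel : Nat) (x y w h : Int) (items : List (Int × (Int × Int))) :
    List (Int × (Int × Int × Int × Int)) × List (Int × (Int × Int)) :=
  match fuel with
  | 0 => ([], items)
  | fuel + 1 =>
    match splitFirstFit w h items with
    | none => ([], items)
    | some (pre, (idx, (iw, ih)), suf) =>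
      let rR := region fuel (x + iw) y (w - iw) ih suf
      let rD := region fuel x (y + ih) w (h - ih) rR.2
      ((idx, (x, y, iw, ih)) :: rR.1 ++ rD.1, pre ++ rD.2)

def try_pack_alt (tw : Int) (th : Int) (items : List (Int × (Int × Int))) :
    Option (List (Int × Int × Int × Int)) :=
  let r := region items.length 0 0 tw th items
  if r.2.isEmpty then
    some ((PySem.List.sorted r.1 pyPairKey).map (·.2))
  else none

-- ===== PRECONDITION & SPEC =====
def Spec_try_pack (tw : Int) (th : Int) (items : List (Int × (Int × Int))) (out : Option (List (Int × Int × Int × Int))) : Prop := out = try_pack_alt tw th items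
instance (tw : Int) (th : Int) (items : List (Int × (Int × Int))) (out : Option (List (Int × Int × Int × Int))) : Decidable (Spec_try_pack tw th items out) := by unfold Spec_try_pack; infer_instance

-- ===== CLAIM (what is proved, stated in full; the proofs are below) =====
def Claim_equal_try_pack : Prop := ∀ (tw : Int) (th : Int) (items : List (Int × (Int × Int))), Dom_try_pack tw th items → Spec_try_pack tw th items (try_pack tw th items)

-- ===== LEMMAS AND PROOFS =====

-- proof-only model of A: feed the whole item stream through a tree, collecting
-- placements and (in order) the rejected items, instead of stopping at the first reject
def feed (t : PackNode) : List (Int × (Int × Int)) →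
    List (Int × (Int × Int × Int × Int)) × List (Int × (Int × Int)) × PackNode
  | [] => ([], [], t)
  | (idx, (w, h)) :: rest =>
    match nodeInsert t w h with
    | (some p, t') =>
      let r := feed t' rest
      ((idx, p) :: r.1, r.2.1, r.2.2)
    | (none, _) =>
      let r := feed t rest
      (r.1, (idx, (w, h)) :: r.2.1, r.2.2)

theorem packLoopA_feed (items : List (Int × (Int × Int))) (t : PackNode)
    (acc : List (Int × (Int × Int × Int × Int))) :
    packLoopA t items acc =
      if (feed t items).2.1 = [] then some (acc ++ (feed t items).1) else none := by
  induction items generalizing t acc with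
  | nil => simp [packLoopA, feed]
  | cons it rest ih =>
    obtain ⟨idx, w, h⟩ := it
    simp only [packLoopA, feed]
    cases hn : nodeInsert t w h with
    | mk pr t' =>
      cases pr with
      | some p =>
        dsimp only
        rw [ih t' (acc ++ [(idx, p)])]
        split_ifs <;> simp
      | none => simp

-- feeding a node = feed the right subtree, then feed its rejects to the down subtree;
-- placements agree up to permutation, rejects agree exactly
theorem feed_node (items : List (Int × (Int × Int))) (x y sw sh : Int)
    (r d : PackNode) :
    (feed (.node x y sw sh r d) items).1.Perm
        ((feed r items).1 ++ (feed d (feed r items).2.1).1) ∧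
    (feed (.node x y sw sh r d) items).2.1 = (feed d (feed r items).2.1).2.1 := by
  induction items generalizing r d with
  | nil => simp [feed]
  | cons it rest ih =>
    obtain ⟨idx, w, h⟩ := it
    simp only [feed, nodeInsert]
    cases hr : nodeInsert r w h with
    | mk prr r' =>
      cases prr with
      | some p =>
        simp only
        obtain ⟨hperm, hrej⟩ := ih r' d
        exact ⟨by simpa using hperm.cons (idx, p), hrej⟩
      | none =>
        cases hd : nodeInsert d w h with
        | mk prd d' =>
          cases prd with
          | some p =>
            simp only [feed, hd]
            obtain ⟨hperm, hrej⟩ := ih r d'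
            exact ⟨(hperm.cons (idx, p)).trans List.perm_middle.symm, hrej⟩
          | none =>
            simp only [feed, hd]
            obtain ⟨hperm, hrej⟩ := ih r d
            exact ⟨hperm, by simp [hrej]⟩

-- shape of a successful first-fit scan (used by the proofs below)
theorem splitFirstFit_length {w h : Int} {items pre suf : List (Int × (Int × Int))}
    {hit : Int × (Int × Int)}
    (hs : splitFirstFit w h items = some (pre, hit, suf)) :
    pre.length + 1 + suf.length = items.length := by
  induction items generalizing pre hit suf with
  | nil => simp [splitFirstFit] at hs
  | cons it rest ih =>
    simp only [splitFirstFit] at hs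
    split_ifs at hs with hfit
    · cases hs; simp; omega
    · cases hr : splitFirstFit w h rest with
      | none => rw [hr] at hs; cases hs
      | some r =>
        obtain ⟨pre', hit', suf'⟩ := r
        rw [hr] at hs
        cases hs
        have := ih hr
        simp only [List.length_cons]
        omega

theorem splitFirstFit_none {w h : Int} {items : List (Int × (Int × Int))}
    (hs : splitFirstFit w h items = none) :
    ∀ it ∈ items, ¬(it.2.1 ≤ w ∧ it.2.2 ≤ h) := by
  induction items with
  | nil => simp
  | cons it rest ih =>
    simp only [splitFirstFit] at hs
    split_ifs at hs with hfit
    · cases hr : splitFirstFit w h rest with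
      | none =>
        intro a ha
        rcases List.mem_cons.mp ha with hEq | hm
        · subst hEq; exact hfit
        · exact ih hr a hm
      | some res => rw [hr] at hs; cases hs

theorem splitFirstFit_some {w h : Int} {items pre suf : List (Int × (Int × Int))}
    {hit : Int × (Int × Int)}
    (hs : splitFirstFit w h items = some (pre, hit, suf)) :
    items = pre ++ hit :: suf ∧ (∀ it ∈ pre, ¬(it.2.1 ≤ w ∧ it.2.2 ≤ h)) ∧
      hit.2.1 ≤ w ∧ hit.2.2 ≤ h := by
  induction items generalizing pre hit suf with
  | nil => simp [splitFirstFit] at hs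
  | cons it rest ih =>
    simp only [splitFirstFit] at hs
    split_ifs at hs with hfit
    · cases hs; simpa using hfit
    · cases hr : splitFirstFit w h rest with
      | none => rw [hr] at hs; cases hs
      | some res =>
        obtain ⟨pre', hit', suf'⟩ := res
        rw [hr] at hs
        cases hs
        obtain ⟨heq, hpre, hhit⟩ := ih hr
        refine ⟨by simp [heq], ?_, hhit⟩
        intro a ha
        rcases List.mem_cons.mp ha with hEq | hm
        · subst hEq; exact hfit
        · exact hpre a hm

-- a leaf rejects every item of a stream none of which fits
theorem feed_leaf_nofit (x y w h : Int) (items : List (Int × (Int × Int)))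
    (hall : ∀ it ∈ items, ¬(it.2.1 ≤ w ∧ it.2.2 ≤ h)) :
    feed (.leaf x y w h) items = ([], items, .leaf x y w h) := by
  induction items with
  | nil => simp [feed]
  | cons it rest ih =>
    obtain ⟨idx, iw, ihh⟩ := it
    have hfit : ¬(iw ≤ w ∧ ihh ≤ h) := by
      have := hall (idx, iw, ihh) (by simp)
      simpa using this
    simp only [feed, nodeInsert, if_neg hfit]
    rw [ih (fun a ha => hall a (List.mem_cons_of_mem _ ha))]

-- a leaf passes a prefix of non-fitting items through untouched
theorem feed_leaf_prefix (pre : List (Int × (Int × Int))) (x y w h : Int)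
    (l : List (Int × (Int × Int)))
    (hpre : ∀ it ∈ pre, ¬(it.2.1 ≤ w ∧ it.2.2 ≤ h)) :
    feed (.leaf x y w h) (pre ++ l) =
      ((feed (.leaf x y w h) l).1, pre ++ (feed (.leaf x y w h) l).2.1,
        (feed (.leaf x y w h) l).2.2) := by
  induction pre with
  | nil => simp
  | cons it rest ih =>
    obtain ⟨idx, iw, ihh⟩ := it
    have hfit : ¬(iw ≤ w ∧ ihh ≤ h) := by
      have := hpre (idx, iw, ihh) (by simp)
      simpa using this
    simp only [List.cons_append, feed, nodeInsert, if_neg hfit]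
    rw [ih (fun a ha => hpre a (List.mem_cons_of_mem _ ha))]

-- the rejects of a region are a selection of its input stream
theorem region_rej_len (fuel : Nat) : ∀ (x y w h : Int) (items : List (Int × (Int × Int))),
    (region fuel x y w h items).2.length ≤ items.length := by
  induction fuel with
  | zero => intro x y w h items; simp [region]
  | succ n ih =>
    intro x y w h items
    cases hs : splitFirstFit w h items with
    | none => simp [region, hs]
    | some res =>
      obtain ⟨pre, ⟨idx, iw, ihh⟩, suf⟩ := res
      have hlen' := splitFirstFit_length hs
      have h2 := ih x (y + ihh) w (h - ihh) (region n (x + iw) y (w - iw) ihh suf).2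
      have h3 := ih (x + iw) y (w - iw) ihh suf
      simp only [region, hs, List.length_append]
      omega

-- the crux: region = feed through the single-leaf tree, placements up to
-- permutation, rejects exactly
theorem region_feed_aux (fuel : Nat) : ∀ (x y w h : Int) (items : List (Int × (Int × Int))),
    items.length ≤ fuel →
    (region fuel x y w h items).1.Perm (feed (.leaf x y w h) items).1 ∧
    (region fuel x y w h items).2 = (feed (.leaf x y w h) items).2.1 := by
  induction fuel with
  | zero =>
    intro x y w h items hlen
    have : items = [] := List.eq_nil_of_length_eq_zero (Nat.le_zero.mp hlen)
    subst this
    simp [region, feed]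
  | succ n ih =>
    intro x y w h items hlen
    cases hs : splitFirstFit w h items with
    | none =>
      rw [feed_leaf_nofit x y w h items (splitFirstFit_none hs)]
      simp [region, hs]
    | some res =>
      obtain ⟨pre, ⟨idx, iw, ihh⟩, suf⟩ := res
      obtain ⟨heq, hpre, hfit1, hfit2⟩ := splitFirstFit_some hs
      have hlen' := splitFirstFit_length hs
      simp only [region, hs]
      have ihR := ih (x + iw) y (w - iw) ihh suf (by omega)
      have hrlen : (region n (x + iw) y (w - iw) ihh suf).2.length ≤ suf.length :=
        region_rej_len n (x + iw) y (w - iw) ihh suf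
      have ihD := ih x (y + ihh) w (h - ihh)
        (region n (x + iw) y (w - iw) ihh suf).2 (by omega)
      obtain ⟨hRp, hRr⟩ := ihR
      obtain ⟨hDp, hDr⟩ := ihD
      rw [heq, feed_leaf_prefix pre x y w h _ hpre]
      simp only [feed, nodeInsert, if_pos (And.intro hfit1 hfit2)]
      obtain ⟨hnp, hnr⟩ := feed_node suf x y w h
        (.leaf (x + iw) y (w - iw) ihh) (.leaf x (y + ihh) w (h - ihh))
      rw [hRr] at hDp hDr
      constructor
      · simp only [List.cons_append]
        rw [hRr]
        exact ((hRp.append hDp).trans hnp.symm).cons _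
      · dsimp only
        rw [hRr, hDr, hnr]

theorem region_feed (x y w h : Int) (items : List (Int × (Int × Int))) :
    (region items.length x y w h items).1.Perm (feed (.leaf x y w h) items).1 ∧
    (region items.length x y w h items).2 = (feed (.leaf x y w h) items).2.1 :=
  region_feed_aux items.length x y w h items (le_refl _)

-- pyPairKey is injective: equal keys ⇒ equal placements, so sorting a permutation
-- with this key gives the identical list
theorem pyPairKey_injective : Function.Injective pyPairKey := by
  intro a b hab
  obtain ⟨a1, a2, a3, a4, a5⟩ := a
  obtain ⟨b1, b2, b3, b4, b5⟩ := b
  simpa [pyPairKey, Prod.ext_iff] using hab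

-- ===== VERDICT (by name: the statement is the Claim_ definition above) =====
theorem try_pack_spec : Claim_equal_try_pack := by
  intro tw th items _
  show try_pack tw th items = try_pack_alt tw th items
  unfold try_pack try_pack_alt
  obtain ⟨hperm, hrej⟩ := region_feed 0 0 tw th items
  rw [packLoopA_feed]
  by_cases hempty : (feed (.leaf 0 0 tw th) items).2.1 = []
  · rw [if_pos hempty]
    have hB : (region items.length 0 0 tw th items).2.isEmpty = true := by
      rw [hrej, hempty]; rfl
    simp only [hB, if_pos]
    have := PySem.List.sorted_eq_sorted_of_perm _ _ pyPairKey pyPairKey_injective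
      (by simpa using hperm.symm)
    simp [this]
  · rw [if_neg hempty]
    have hB : ¬(region items.length 0 0 tw th items).2.isEmpty = true := by
      rw [hrej]; simpa [List.isEmpty_iff] using hempty
    simp [hB]
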